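-- pv_equiv track=rewrite | github.com/Pr00fOf3xpl0it/Actuator-reaper | heapdump-analyzer.py | is_valid_secret
-- ===== SOURCE A (Python) =====
-- def is_valid_secret(secret):
--     """Check if secret looks valid"""
--     # Filter out common false positives
--     blacklist = [
--         'password', 'username', 'apikey', 'secret', 'token',
--         'localhost', '127.0.0.1', 'example.com',
--         'null', 'undefined', 'true', 'false'
--     ]
--
--     secret_lower = secret.lower()
--     return not any(black in secret_lower for black in blacklist)
-- ===== SOURCE B (Python) =====
-- def is_valid_secret(secret):
--     """Check if secret looks valid"""
--     # Single left-to-right scan over positions: at each position, test whether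
--     # any blacklisted word begins there (prefix check), instead of running an
--     # independent full substring search per pattern.
--     blacklist = [
--         'password', 'username', 'apikey', 'secret', 'token',
--         'localhost', '127.0.0.1', 'example.com',
--         'null', 'undefined', 'true', 'false'
--     ]
--     s = secret.lower()
--     for i in range(len(s)):
--         for black in blacklist:
--             if s.startswith(black, i):
--                 return False
--     return True
-- ===== Notes on version B (the rewrite author's own statement) =====
-- stated objective: alternative
-- what changed: A runs an independent substring search for each of the 13 blacklist entries; B makes one left-to-right scan over positions of the lowered secret and at each position does a prefix check per entry, so the outer traversal is over positions, not patterns.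
import Mathlib
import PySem

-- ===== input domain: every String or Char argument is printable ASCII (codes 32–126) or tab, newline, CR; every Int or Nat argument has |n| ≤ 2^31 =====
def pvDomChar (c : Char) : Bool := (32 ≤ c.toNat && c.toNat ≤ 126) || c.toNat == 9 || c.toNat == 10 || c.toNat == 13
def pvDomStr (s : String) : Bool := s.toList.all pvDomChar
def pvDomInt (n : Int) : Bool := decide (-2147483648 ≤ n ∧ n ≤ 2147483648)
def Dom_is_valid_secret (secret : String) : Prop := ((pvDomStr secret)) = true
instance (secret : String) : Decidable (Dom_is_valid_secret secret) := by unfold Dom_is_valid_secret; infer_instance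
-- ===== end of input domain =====

-- B replaces A's per-pattern substring searches by a single positional scan with
-- per-position prefix checks (objective: alternative traversal, same results).

-- ===== PORT A =====
def pvBlacklist : List String :=
  ["password", "username", "apikey", "secret", "token",
   "localhost", "127.0.0.1", "example.com",
   "null", "undefined", "true", "false"]

def is_valid_secret (secret : String) : Bool :=
  let secret_lower := PySem.Str.lower secret
  !(pvBlacklist.any (fun black => PySem.Str.isIn black secret_lower))

-- ===== PORT B =====
-- range(len(s)) is ported as List.range s.toList.length (exact: len(s) ≥ 0), and
-- s.startswith(black, i) as a prefix test on s dropped at i (exact for 0 ≤ i).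
def is_valid_secret_alt (secret : String) : Bool :=
  let s := (PySem.Str.lower secret).toList
  !((List.range s.length).any (fun i =>
      pvBlacklist.any (fun black => PySem.Chars.startswith (s.drop i) black.toList)))

-- ===== PRECONDITION & SPEC =====
def Spec_is_valid_secret (secret : String) (out : Bool) : Prop := out = is_valid_secret_alt secret
instance (secret : String) (out : Bool) : Decidable (Spec_is_valid_secret secret out) := by unfold Spec_is_valid_secret; infer_instance

-- ===== CLAIM (what is proved, stated in full; the proofs are below) =====
def Claim_equal_is_valid_secret : Prop := ∀ (secret : String), Dom_is_valid_secret secret → Spec_is_valid_secret secret (is_valid_secret secret)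

-- ===== LEMMAS AND PROOFS =====

-- A nonempty pattern occurs as a substring iff it is a prefix at some position < length.
theorem pv_isIn_iff_exists_pos (b s : List Char) (hb : b ≠ []) :
    PySem.Chars.isIn b s = true ↔ ∃ i < s.length, b <+: s.drop i := by
  rw [← PySem.Chars.exists_prefix_drop_iff_isIn]
  constructor
  · rintro ⟨j, hj⟩
    by_cases h : j < s.length
    · exact ⟨j, h, hj⟩
    · exfalso
      have : s.drop j = [] := List.drop_eq_nil_of_le (by omega)
      rw [this] at hj
      exact hb (List.prefix_nil.mp hj)
  · rintro ⟨i, _, hi⟩; exact ⟨i, hi⟩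

theorem pv_blacklist_nonempty : ∀ b ∈ pvBlacklist, b.toList ≠ [] := by decide

-- ===== VERDICT (by name: the statement is the Claim_ definition above) =====
theorem is_valid_secret_spec : Claim_equal_is_valid_secret := by
  intro secret _
  unfold Spec_is_valid_secret is_valid_secret is_valid_secret_alt
  set s := (PySem.Str.lower secret).toList with hs
  suffices h : (pvBlacklist.any (fun black => PySem.Str.isIn black (PySem.Str.lower secret)))
      = ((List.range s.length).any (fun i =>
          pvBlacklist.any (fun black => PySem.Chars.startswith (s.drop i) black.toList))) by
    simpa using congrArg (fun x => !x) h
  rw [Bool.eq_iff_iff]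
  simp only [List.any_eq_true, List.mem_range, PySem.Str.isIn_eq,
    PySem.Chars.startswith_iff, ← hs]
  constructor
  · rintro ⟨b, hb, hins⟩
    obtain ⟨i, hi, hpre⟩ := (pv_isIn_iff_exists_pos b.toList s (pv_blacklist_nonempty b hb)).mp hins
    exact ⟨i, hi, b, hb, hpre⟩
  · rintro ⟨i, hi, b, hb, hpre⟩
    exact ⟨b, hb, (pv_isIn_iff_exists_pos b.toList s (pv_blacklist_nonempty b hb)).mpr ⟨i, hi, hpre⟩⟩
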